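-- pv_equiv track=rewrite | github.com/iliyannm/Python-101-Forever | C01P17/Word counter.py | left_down_diagonal
-- ===== SOURCE A (Python) =====
-- def left_down_diagonal(mat, word, letter, row, col, index_pairs):
--     found = False
--     while row + 1 < len(mat) and col - 1 >= 0:
--         row += 1
--         col -= 1
--         letter += mat[row][col]
--         if letter == word:
--             found = True
--             break
--
--     if found:
--         for pair in index_pairs:
--             if row == pair[0] + (len(word) - 1) and col == pair[1] - (len(word) - 1):
--                 return False
--         return True
--
--     return False
-- ===== SOURCE B (Python) =====
-- def left_down_diagonal(mat, word, letter, row, col, index_pairs):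
--     acc = letter
--     n = len(word) - 1
--     for j in range(1, min(len(mat) - row, col + 1)):
--         acc += mat[row + j][col - j]
--         if acc == word:
--             return (row + j - n, col - j + n) not in index_pairs
--         if not word.startswith(acc):
--             return False
--     return False
-- ===== Notes on version B (the rewrite author's own statement) =====
-- stated objective: simpler
-- what changed: Replaces A's mutate-and-flag while-walk plus a separate endpoint scan over index_pairs with one counted for-loop that prunes as soon as the accumulated string stops being a prefix of the word and decides the index_pairs test by a direct tuple-membership check at the match point; Pre_ excludes inputs whose in-bounds down-left diagonal has a missing cell (ragged rows), where A normally raises IndexError.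
-- outside the precondition, e.g. on left_down_diagonal([['x', 'a'], ['b', 'c'], []], 'ac', 'a', 0, 2, []): A returns True, B returns True
import Mathlib
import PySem

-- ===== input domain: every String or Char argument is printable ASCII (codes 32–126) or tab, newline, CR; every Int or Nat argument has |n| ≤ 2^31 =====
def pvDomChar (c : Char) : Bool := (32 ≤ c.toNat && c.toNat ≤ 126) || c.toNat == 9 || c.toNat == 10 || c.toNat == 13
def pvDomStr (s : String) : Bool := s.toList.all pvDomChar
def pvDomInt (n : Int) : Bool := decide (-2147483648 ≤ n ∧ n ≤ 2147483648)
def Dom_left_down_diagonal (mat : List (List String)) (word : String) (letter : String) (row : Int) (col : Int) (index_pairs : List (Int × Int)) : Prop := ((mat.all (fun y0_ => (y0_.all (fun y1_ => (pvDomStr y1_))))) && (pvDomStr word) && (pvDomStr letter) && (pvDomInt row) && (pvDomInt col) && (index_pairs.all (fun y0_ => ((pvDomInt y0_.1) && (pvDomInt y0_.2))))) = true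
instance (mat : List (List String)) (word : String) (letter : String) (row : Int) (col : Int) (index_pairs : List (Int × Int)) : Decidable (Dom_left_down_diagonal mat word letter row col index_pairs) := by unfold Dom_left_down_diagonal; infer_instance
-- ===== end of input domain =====

-- B replaces A's mutate-and-flag while-walk (plus a separate endpoint scan over
-- index_pairs) by a counted for-loop that prunes as soon as the accumulated string
-- stops being a prefix of the word and decides the index_pairs test by a direct
-- tuple-membership check at the match point (objective: simpler).

-- Shared cell accessor: mat[r][c] with Python's negative-index rule; the "" default
-- is never read on inputs inside Pre_.
def pvCell (mat : List (List String)) (r c : Int) : List Char :=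
  (((PySem.List.pyGet? mat r).bind (fun rw => PySem.List.pyGet? rw c)).getD "").toList

-- ===== PORT A =====
-- A's while-loop; fuel = col.toNat always suffices: entering the loop needs col - 1 ≥ 0
-- and each pass decrements col, so at fuel 0 the condition is false anyway.
def pvLoopA (mat : List (List String)) (w : List Char) : Nat → List Char → Int → Int → Bool × Int × Int
  | 0, _, row, col => (false, row, col)
  | fuel+1, letter, row, col =>
    if row + 1 < (mat.length : Int) ∧ col - 1 ≥ 0 then
      let letter' := letter ++ pvCell mat (row+1) (col-1)
      if letter' = w then (true, row+1, col-1)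
      else pvLoopA mat w fuel letter' (row+1) (col-1)
    else (false, row, col)

def left_down_diagonal (mat : List (List String)) (word : String) (letter : String) (row : Int) (col : Int) (index_pairs : List (Int × Int)) : Bool :=
  let res := pvLoopA mat word.toList col.toNat letter.toList row col
  if res.1 then
    if index_pairs.any (fun pair =>
        decide (res.2.1 = pair.1 + ((word.toList.length : Int) - 1)) &&
        decide (res.2.2 = pair.2 - ((word.toList.length : Int) - 1))) then false
    else true
  else false

-- ===== PORT B =====
-- Source B's for-loop over j = 1 .. min(len(mat)-row, col+1)-1, early returns and all;
-- the counted recursion is the loop, j is Source B's loop variable.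
def pvBLoop (mat : List (List String)) (w : List Char) (ips : List (Int × Int)) (row col : Int) :
    Nat → List Char → Int → Bool
  | 0, _, _ => false
  | m+1, acc, j =>
    let acc' := acc ++ pvCell mat (row + j) (col - j)
    if acc' = w then
      !ips.contains (row + j - ((w.length : Int) - 1), col - j + ((w.length : Int) - 1))
    else if acc'.isPrefixOf w then pvBLoop mat w ips row col m acc' (j+1)
    else false

def left_down_diagonal_alt (mat : List (List String)) (word : String) (letter : String) (row : Int) (col : Int) (index_pairs : List (Int × Int)) : Bool :=
  pvBLoop mat word.toList index_pairs row col
    ((min ((mat.length : Int) - row) (col + 1)) - 1).toNat letter.toList 1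

-- ===== PRECONDITION & SPEC =====
-- number of down-left steps the while-bounds allow from (row, col)
def pvM (mat : List (List String)) (row col : Int) : Int :=
  max 0 (min ((mat.length : Int) - 1 - row) col)

-- Pre_ excludes inputs whose in-bounds down-left diagonal contains a missing cell
-- (ragged or missing rows), on which A raises IndexError; in the rare excluded case
-- where A matches the word before reaching the missing cell A returns normally and B
-- returns the same value (cited in claim.json) — Pre_ is conservative there.
-- The first conjunct is implied by the second whenever pvM ≥ 1 (every accessible row
-- index lies in [-len, len)); it is kept so the Decidable instance computes fast.
def Pre_left_down_diagonal (mat : List (List String)) (word : String) (letter : String) (row : Int) (col : Int) (index_pairs : List (Int × Int)) : Prop :=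
  pvM mat row col ≤ 2 * (mat.length : Int) ∧
  ∀ j : Nat, j < (pvM mat row col).toNat →
    ((PySem.List.pyGet? mat (row + (j : Int) + 1)).bind
      (fun rw => PySem.List.pyGet? rw (col - (j : Int) - 1))).isSome
instance (mat : List (List String)) (word : String) (letter : String) (row : Int) (col : Int) (index_pairs : List (Int × Int)) : Decidable (Pre_left_down_diagonal mat word letter row col index_pairs) := by unfold Pre_left_down_diagonal; infer_instance

def pvWitness_left_down_diagonal : List (List String) × String × String × Int × Int × (List (Int × Int)) :=
  ([["x", "a"], ["b", "c"]], "ab", "a", 0, 1, [])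

def Spec_left_down_diagonal (mat : List (List String)) (word : String) (letter : String) (row : Int) (col : Int) (index_pairs : List (Int × Int)) (out : Bool) : Prop := out = left_down_diagonal_alt mat word letter row col index_pairs
instance (mat : List (List String)) (word : String) (letter : String) (row : Int) (col : Int) (index_pairs : List (Int × Int)) (out : Bool) : Decidable (Spec_left_down_diagonal mat word letter row col index_pairs out) := by unfold Spec_left_down_diagonal; infer_instance

-- ===== CLAIM (what is proved, stated in full; the proofs are below) =====
def Claim_equal_left_down_diagonal : Prop := ∀ (mat : List (List String)) (word : String) (letter : String) (row : Int) (col : Int) (index_pairs : List (Int × Int)), Dom_left_down_diagonal mat word letter row col index_pairs → Pre_left_down_diagonal mat word letter row col index_pairs → Spec_left_down_diagonal mat word letter row col index_pairs (left_down_diagonal mat word letter row col index_pairs)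

-- ===== LEMMAS AND PROOFS =====

-- the post-processing A applies to its loop result (definitionally A's tail)
def pvPost (w : List Char) (ips : List (Int × Int)) (res : Bool × Int × Int) : Bool :=
  if res.1 then
    if ips.any (fun pair =>
        decide (res.2.1 = pair.1 + ((w.length : Int) - 1)) &&
        decide (res.2.2 = pair.2 - ((w.length : Int) - 1))) then false
    else true
  else false

-- B's loop, positionally: (r, c) is the cell about to be read
def pvBPos (mat : List (List String)) (w : List Char) (ips : List (Int × Int)) :
    Nat → List Char → Int → Int → Bool
  | 0, _, _, _ => false
  | m+1, acc, r, c =>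
    let acc' := acc ++ pvCell mat r c
    if acc' = w then
      !ips.contains (r - ((w.length : Int) - 1), c + ((w.length : Int) - 1))
    else if acc'.isPrefixOf w then pvBPos mat w ips m acc' (r+1) (c-1)
    else false

theorem pvBLoop_eq_pos (mat : List (List String)) (w : List Char) (ips : List (Int × Int)) (row col : Int) :
    ∀ (m : Nat) (acc : List Char) (j : Int),
      pvBLoop mat w ips row col m acc j = pvBPos mat w ips m acc (row + j) (col - j) := by
  intro m
  induction m with
  | zero => intro acc j; rfl
  | succ m ih =>
    intro acc j
    simp only [pvBLoop, pvBPos]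
    rw [ih]
    have h1 : row + (j + 1) = row + j + 1 := by ring
    have h2 : col - (j + 1) = col - j - 1 := by ring
    rw [h1, h2]

theorem pvLoopA_not_prefix (mat : List (List String)) (w : List Char) :
    ∀ (f : Nat) (acc : List Char) (r c : Int),
      ¬ acc <+: w → (pvLoopA mat w f acc r c).1 = false := by
  intro f
  induction f with
  | zero => intro acc r c _; rfl
  | succ f ih =>
    intro acc r c hnp
    simp only [pvLoopA]
    by_cases hc : r + 1 < (mat.length : Int) ∧ c - 1 ≥ 0
    · rw [if_pos hc]
      have hnp' : ¬ (acc ++ pvCell mat (r+1) (c-1)) <+: w :=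
        fun h => hnp ((List.prefix_append acc _).trans h)
      have hne : ¬ acc ++ pvCell mat (r+1) (c-1) = w :=
        fun h => hnp' (h ▸ List.prefix_refl (acc ++ pvCell mat (r+1) (c-1)))
      rw [if_neg hne]
      exact ih _ _ _ hnp'
    · rw [if_neg hc]

theorem pv_any_eq_contains (ips : List (Int × Int)) (x y n : Int) :
    ips.any (fun pair => decide (x = pair.1 + n) && decide (y = pair.2 - n))
      = ips.contains (x - n, y + n) := by
  induction ips with
  | nil => rfl
  | cons p t ih =>
    simp only [List.any_cons, List.contains_cons, ih]
    congr 1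
    apply Bool.eq_iff_iff.mpr
    simp only [Bool.and_eq_true, decide_eq_true_eq, beq_iff_eq, Prod.ext_iff]
    omega

theorem pv_loop_eq (mat : List (List String)) (w : List Char) (ips : List (Int × Int)) :
    ∀ (m fA : Nat) (acc : List Char) (r c : Int),
      (m : Int) = pvM mat r c → m ≤ fA →
      pvPost w ips (pvLoopA mat w fA acc r c) = pvBPos mat w ips m acc (r+1) (c-1) := by
  intro m
  induction m with
  | zero =>
    intro fA acc r c hm _
    have hcond : ¬ (r + 1 < (mat.length : Int) ∧ c - 1 ≥ 0) := by
      unfold pvM at hm; omega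
    cases fA with
    | zero => rfl
    | succ f => simp only [pvLoopA, if_neg hcond]; rfl
  | succ m ih =>
    intro fA acc r c hm hfA
    have hcond : r + 1 < (mat.length : Int) ∧ c - 1 ≥ 0 := by
      unfold pvM at hm; constructor <;> omega
    obtain ⟨f, rfl⟩ : ∃ f, fA = f + 1 := ⟨fA - 1, by omega⟩
    simp only [pvLoopA, if_pos hcond, pvBPos]
    by_cases heq : acc ++ pvCell mat (r+1) (c-1) = w
    · rw [if_pos heq, if_pos heq]
      simp only [pvPost]
      rw [pv_any_eq_contains]
      cases hb : (ips.contains (r + 1 - ((w.length : Int) - 1), c - 1 + ((w.length : Int) - 1))) <;> simp [hb]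
    · rw [if_neg heq, if_neg heq]
      by_cases hp : (acc ++ pvCell mat (r+1) (c-1)).isPrefixOf w = true
      · rw [if_pos hp]
        have hm' : (m : Int) = pvM mat (r+1) (c-1) := by
          unfold pvM at hm ⊢; push_cast at hm ⊢; omega
        have := ih f (acc ++ pvCell mat (r+1) (c-1)) (r+1) (c-1) hm' (by omega)
        rw [this]
      · rw [if_neg hp]
        have hfst := pvLoopA_not_prefix mat w f (acc ++ pvCell mat (r+1) (c-1)) (r+1) (c-1)
          (fun h => hp (List.isPrefixOf_iff_prefix.mpr h))
        simp only [pvPost, hfst]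
        rfl

theorem pv_main (mat : List (List String)) (word letter : String) (row col : Int)
    (index_pairs : List (Int × Int)) :
    left_down_diagonal mat word letter row col index_pairs =
      left_down_diagonal_alt mat word letter row col index_pairs := by
  show pvPost word.toList index_pairs (pvLoopA mat word.toList col.toNat letter.toList row col)
      = left_down_diagonal_alt mat word letter row col index_pairs
  unfold left_down_diagonal_alt
  rw [pvBLoop_eq_pos]
  set m : Nat := ((min ((mat.length : Int) - row) (col + 1)) - 1).toNat with hmdef
  have hm : (m : Int) = pvM mat row col := by unfold pvM; omega
  have hfA : m ≤ col.toNat := by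
    have : pvM mat row col ≤ max 0 col := by
      unfold pvM
      rcases le_total ((mat.length : Int) - 1 - row) col with h | h <;>
        simp [min_def, h] <;> omega
    omega
  have := pv_loop_eq mat word.toList index_pairs m col.toNat letter.toList row col hm hfA
  rw [this]

-- ===== VERDICT (by name: the statement is the Claim_ definition above) =====
theorem left_down_diagonal_spec : Claim_equal_left_down_diagonal := by
  intro mat word letter row col index_pairs _ _
  unfold Spec_left_down_diagonal
  exact pv_main mat word letter row col index_pairs
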